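-- pv_equiv track=rewrite | github.com/AndrewBarba/cs5700 | project_4/src/rawsocket.py | tcp_checksum
-- ===== SOURCE A (Python) =====
-- def tcp_checksum(msg):
--     """
--     Computes the checksum of a single TCP/IP packet
--     """
--     s = 0
--     for i in range(0, len(msg), 2):
--         w = ord(msg[i]) + (ord(msg[i+1]) << 8 )
--         s = s + w
--     s = (s>>16) + (s & 0xffff);
--     s = s + (s >> 16);
--     s = ~s & 0xffff
--     return s
-- ===== SOURCE B (Python) =====
-- def tcp_checksum(msg):
--     """
--     Computes the checksum of a single TCP/IP packet
--     """
--     lo = 0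
--     hi = 0
--     odd = False
--     for ch in msg:
--         if odd:
--             hi += ord(ch)
--         else:
--             lo += ord(ch)
--         odd = not odd
--     s = lo + (hi << 8)
--     s = (s >> 16) + (s & 0xffff)
--     s = s + (s >> 16)
--     return ~s & 0xffff
-- ===== Notes on version B (the rewrite author's own statement) =====
-- stated objective: alternative
-- what changed: B replaces A's index loop over range(0,len,2) (building a 16-bit word with two subscript operations per step) by a single direct pass over the characters that accumulates low-byte and high-byte sums separately and combines them once as lo + (hi << 8) before the final folds; Pre_ excludes odd-length strings, on which A raises IndexError.
import Mathlib
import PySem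

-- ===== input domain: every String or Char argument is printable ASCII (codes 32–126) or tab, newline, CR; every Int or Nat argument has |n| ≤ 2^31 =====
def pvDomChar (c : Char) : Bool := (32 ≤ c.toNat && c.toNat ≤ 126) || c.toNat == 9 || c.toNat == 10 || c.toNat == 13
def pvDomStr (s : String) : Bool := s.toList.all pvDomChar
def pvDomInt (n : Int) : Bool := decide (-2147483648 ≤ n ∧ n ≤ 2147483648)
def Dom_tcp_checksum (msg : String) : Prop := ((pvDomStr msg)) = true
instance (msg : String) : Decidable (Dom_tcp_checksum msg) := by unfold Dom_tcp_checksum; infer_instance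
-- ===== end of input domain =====

-- B replaces A's index loop (two chars per step via range(0,len,2)) by one direct pass summing
-- low and high bytes separately, combined once as lo + (hi << 8); same value on even-length input,
-- and B returns the zero-padded checksum where A raises IndexError (odd length).


-- ===== PORT A =====
-- for i in range(0, len(msg), 2): s += ord(msg[i]) + (ord(msg[i+1]) << 8)
-- (indexing via pyGetD: Pre_ guarantees both indices are in range wherever the claim applies)
def tcp_checksum (msg : String) : Int :=
  let cs := msg.toList
  let s : Int :=
    (PySem.List.pyRange 0 (PySem.Str.len msg) 2).foldl
      (fun s i =>
        s + (((PySem.List.pyGetD cs i ' ').toNat : Int) +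
             (((PySem.List.pyGetD cs (i + 1) ' ').toNat : Int) <<< (8:Nat))))
      0
  let s := (s >>> (16:Nat)) + PySem.Int.band s 0xffff
  let s := s + (s >>> (16:Nat))
  PySem.Int.band (Int.not s) 0xffff

-- ===== PORT B =====
def tcp_checksum_alt (msg : String) : Int :=
  let st : Int × Int × Bool :=
    msg.toList.foldl
      (fun st ch =>
        if st.2.2 then (st.1, st.2.1 + (ch.toNat : Int), !st.2.2)
        else (st.1 + (ch.toNat : Int), st.2.1, !st.2.2))
      (0, 0, false)
  let s := st.1 + (st.2.1 <<< (8:Nat))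
  let s := (s >>> (16:Nat)) + PySem.Int.band s 0xffff
  let s := s + (s >>> (16:Nat))
  PySem.Int.band (Int.not s) 0xffff

-- ===== PRECONDITION & SPEC =====
-- Pre_ excludes exactly the odd-length strings, on which A raises IndexError at msg[i+1].
def Pre_tcp_checksum (msg : String) : Prop := msg.toList.length % 2 = 0
instance (msg : String) : Decidable (Pre_tcp_checksum msg) := by unfold Pre_tcp_checksum; infer_instance
def pvWitness_tcp_checksum : String := "ab"

def Spec_tcp_checksum (msg : String) (out : Int) : Prop := out = tcp_checksum_alt msg
instance (msg : String) (out : Int) : Decidable (Spec_tcp_checksum msg out) := by unfold Spec_tcp_checksum; infer_instance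

-- ===== CLAIM (what is proved, stated in full; the proofs are below) =====
def Claim_equal_tcp_checksum : Prop := ∀ (msg : String), Dom_tcp_checksum msg → Pre_tcp_checksum msg → Spec_tcp_checksum msg (tcp_checksum msg)

-- ===== LEMMAS AND PROOFS =====

-- pairwise byte sums of a list read two characters at a time: (Σ even-index, Σ odd-index)
def pvPsum : List Char → Int × Int
  | [] => (0, 0)
  | [c] => ((c.toNat : Int), 0)
  | c0 :: c1 :: r => ((c0.toNat : Int) + (pvPsum r).1, (c1.toNat : Int) + (pvPsum r).2)

-- B's loop starting in even phase computes the two byte sums.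
lemma pvB_loop (cs : List Char) (lo hi : Int) :
    cs.foldl
      (fun (st : Int × Int × Bool) ch =>
        if st.2.2 then (st.1, st.2.1 + (ch.toNat : Int), !st.2.2)
        else (st.1 + (ch.toNat : Int), st.2.1, !st.2.2))
      (lo, hi, false)
    = (lo + (pvPsum cs).1, hi + (pvPsum cs).2,
        if cs.length % 2 = 1 then true else false) := by
  induction cs using pvPsum.induct generalizing lo hi with
  | case1 => simp [pvPsum]
  | case2 c => simp [pvPsum, List.foldl]
  | case3 c0 c1 r ih =>
      simp only [List.foldl_cons]
      norm_num
      rw [ih]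
      simp only [pvPsum, Prod.mk.injEq]
      refine ⟨by ring, by ring, ?_⟩
      have hm : (r.length + 1 + 1) % 2 = r.length % 2 := by omega
      by_cases h1 : r.length % 2 = 1 <;> simp [h1, hm]

-- range(0, n+2, 2) is 0 followed by range(0, n, 2) shifted by 2, for even n.
lemma pvPyRange2_cons (n : Nat) (h : n % 2 = 0) :
    PySem.List.pyRange 0 ((n : Int) + 2) 2
      = 0 :: (PySem.List.pyRange 0 (n : Int) 2).map (· + 2) := by
  rw [PySem.List.pyRange_of_pos _ _ (by norm_num), PySem.List.pyRange_of_pos _ _ (by norm_num)]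
  have h1 : (if (0:Int) < (n:Int) + 2 then ((((n:Int) + 2) - 0 + 2 - 1) / 2).toNat else 0)
      = n / 2 + 1 := by
    rw [if_pos (by positivity)]; omega
  have h2 : (if (0:Int) < (n:Int) then (((n:Int) - 0 + 2 - 1) / 2).toNat else 0) = n / 2 := by
    split_ifs <;> omega
  rw [h1, h2, List.range_succ_eq_map, List.map_cons, List.map_map]
  refine List.cons_eq_cons.mpr ⟨by norm_num, ?_⟩
  rw [List.map_map]
  refine List.map_congr_left (fun k _ => ?_)
  simp [Function.comp, Nat.succ_eq_add_one]
  ring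

-- A's fold over range(0, n, 2) computes the byte sums combined as in B, on an even-length list.
lemma pvA_loop (cs : List Char) (h : cs.length % 2 = 0) (s0 : Int) :
    (PySem.List.pyRange 0 (cs.length : Int) 2).foldl
      (fun s i =>
        s + (((PySem.List.pyGetD cs i ' ').toNat : Int) +
             (((PySem.List.pyGetD cs (i + 1) ' ').toNat : Int) <<< (8:Nat))))
      s0
    = s0 + ((pvPsum cs).1 + ((pvPsum cs).2 <<< (8:Nat))) := by
  induction cs using pvPsum.induct generalizing s0 with
  | case1 => simp [pvPsum, PySem.List.pyRange]
  | case2 c => simp at h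
  | case3 c0 c1 r ih =>
      have hr : r.length % 2 = 0 := by simp [List.length_cons] at h; omega
      rw [show ((c0 :: c1 :: r).length : Int) = (r.length : Int) + 2 by
        push_cast [List.length_cons]; ring]
      rw [pvPyRange2_cons r.length hr, List.foldl_cons, List.foldl_map]
      rw [PySem.List.foldl_congr_mem _ _
        (fun s i =>
          s + (((PySem.List.pyGetD r i ' ').toNat : Int) +
               (((PySem.List.pyGetD r (i + 1) ' ').toNat : Int) <<< (8:Nat)))) _
        (by
          intro acc x hx
          have hx0 : 0 ≤ x := ((PySem.List.mem_pyRange_iff_of_pos (by norm_num) x).mp hx).1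
          have e0 : PySem.List.pyGetD (c0 :: c1 :: r) (x + 2) ' ' = PySem.List.pyGetD r x ' ' := by
            rw [PySem.List.pyGetD_of_nonneg _ _ (by omega : (0:Int) ≤ x + 2),
                PySem.List.pyGetD_of_nonneg _ _ hx0,
                show (x + 2).toNat = x.toNat + 2 by omega]
            simp
          have e1 : PySem.List.pyGetD (c0 :: c1 :: r) (x + 2 + 1) ' '
              = PySem.List.pyGetD r (x + 1) ' ' := by
            rw [PySem.List.pyGetD_of_nonneg _ _ (by omega : (0:Int) ≤ x + 2 + 1),
                PySem.List.pyGetD_of_nonneg _ _ (by omega : (0:Int) ≤ x + 1),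
                show (x + 2 + 1).toNat = x.toNat + 1 + 2 by omega,
                show (x + 1).toNat = x.toNat + 1 by omega]
            simp
          simp only [e0, e1])]
      rw [ih hr]
      have g0 : PySem.List.pyGetD (c0 :: c1 :: r) 0 ' ' = c0 := by
        rw [PySem.List.pyGetD_of_nonneg _ _ (by norm_num)]; rfl
      have g1 : PySem.List.pyGetD (c0 :: c1 :: r) (0 + 1) ' ' = c1 := by
        rw [PySem.List.pyGetD_of_nonneg _ _ (by norm_num)]; rfl
      simp only [g0, g1, pvPsum]
      simp [Int.shiftLeft_eq]
      ring

theorem tcp_checksum_spec : Claim_equal_tcp_checksum := by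
  intro msg _ hpre
  unfold Spec_tcp_checksum tcp_checksum tcp_checksum_alt
  simp only [PySem.Str.len_eq]
  rw [pvA_loop msg.toList hpre 0, pvB_loop msg.toList 0 0]
  norm_num
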